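-- pv_equiv track=rewrite | github.com/mattf1n/superposition_awareness | experiments/olmo3_tokenization_detection.py | build_character_tokenization
-- ===== SOURCE A (Python) =====
-- def build_character_tokenization(text: str, single_char_tokens: dict[str, int]) -> list[int] | None:
--     token_ids: list[int] = []
--     for ch in text:
--         token_id = single_char_tokens.get(ch)
--         if token_id is None:
--             return None
--         token_ids.append(token_id)
--     return token_ids
-- ===== SOURCE B (Python) =====
-- def build_character_tokenization(text: str, single_char_tokens: dict[str, int]) -> list[int] | None:
--     # Validate over the deduplicated alphabet: each distinct character is
--     # looked up once via a set-inclusion test, then the text is mapped.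
--     if not set(text) <= single_char_tokens.keys():
--         return None
--     return [single_char_tokens[ch] for ch in text]
-- ===== Notes on version B (the rewrite author's own statement) =====
-- stated objective: alternative
-- what changed: Replaces the positional early-exit loop with a set-inclusion test of the deduplicated alphabet set(text) against the dict's key view, followed by a total mapping pass; each distinct character is validated once instead of once per occurrence.
import Mathlib
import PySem

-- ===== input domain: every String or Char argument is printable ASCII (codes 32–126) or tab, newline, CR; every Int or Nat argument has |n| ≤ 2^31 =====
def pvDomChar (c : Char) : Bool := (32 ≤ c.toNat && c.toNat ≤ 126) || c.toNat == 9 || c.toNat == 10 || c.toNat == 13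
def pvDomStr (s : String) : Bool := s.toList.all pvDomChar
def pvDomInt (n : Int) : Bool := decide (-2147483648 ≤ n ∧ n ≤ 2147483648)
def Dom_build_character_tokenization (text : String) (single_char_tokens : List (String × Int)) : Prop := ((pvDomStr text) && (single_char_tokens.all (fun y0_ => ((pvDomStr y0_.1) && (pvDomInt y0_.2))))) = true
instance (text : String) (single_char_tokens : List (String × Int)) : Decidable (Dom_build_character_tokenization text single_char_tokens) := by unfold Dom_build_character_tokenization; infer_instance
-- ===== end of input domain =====

-- B validates set(text) <= dict.keys() once over the deduplicated alphabet, then maps; alternative decomposition, same cost.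

-- ===== PORT A =====
-- A: one loop over the text, append on hit, early 'return None' on a missing character.
def pvA_loop (scs : PySem.Dict String Int) (cs : List Char) (token_ids : List Int) : Option (List Int) :=
  match cs with
  | [] => some token_ids
  | ch :: rest =>
      match PySem.Dict.get? scs (String.singleton ch) with
      | none => none
      | some token_id => pvA_loop scs rest (token_ids ++ [token_id])

def build_character_tokenization (text : String) (single_char_tokens : List (String × Int)) : Option (List Int) :=
  pvA_loop (PySem.Dict.ofList single_char_tokens) text.toList []

-- ===== PORT B =====
-- B: test the set of distinct characters against the dict's key set, then map (lookup total under the guard).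
def build_character_tokenization_alt (text : String) (single_char_tokens : List (String × Int)) : Option (List Int) :=
  let d := PySem.Dict.ofList single_char_tokens
  let alphabet : PySem.Set String := PySem.Set.ofList (text.toList.map String.singleton)
  if PySem.Set.issubset alphabet (PySem.Dict.keys d) then
    some (text.toList.map (fun ch => PySem.Dict.getD d (String.singleton ch) 0))
  else
    none

-- ===== PRECONDITION & SPEC =====
def Spec_build_character_tokenization (text : String) (single_char_tokens : List (String × Int)) (out : Option (List Int)) : Prop := out = build_character_tokenization_alt text single_char_tokens
instance (text : String) (single_char_tokens : List (String × Int)) (out : Option (List Int)) : Decidable (Spec_build_character_tokenization text single_char_tokens out) := by unfold Spec_build_character_tokenization; infer_instance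

-- ===== CLAIM (what is proved, stated in full; the proofs are below) =====
def Claim_equal_build_character_tokenization : Prop := ∀ (text : String) (single_char_tokens : List (String × Int)), Dom_build_character_tokenization text single_char_tokens → Spec_build_character_tokenization text single_char_tokens (build_character_tokenization text single_char_tokens)

-- ===== LEMMAS AND PROOFS =====
theorem pvA_loop_eq (scs : PySem.Dict String Int) (cs : List Char) (acc : List Int) :
    pvA_loop scs cs acc =
      if cs.all (fun ch => PySem.Dict.contains scs (String.singleton ch)) then
        some (acc ++ cs.map (fun ch => PySem.Dict.getD scs (String.singleton ch) 0))
      else none := by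
  induction cs generalizing acc with
  | nil => simp [pvA_loop]
  | cons ch rest ih =>
      simp only [pvA_loop, List.all_cons, List.map_cons]
      cases h : PySem.Dict.get? scs (String.singleton ch) with
      | none =>
          have hc : PySem.Dict.contains scs (String.singleton ch) = false := by
            simp [PySem.Dict.contains_eq_isSome_get?, h]
          simp [hc]
      | some v =>
          have hc : PySem.Dict.contains scs (String.singleton ch) = true := by
            simp [PySem.Dict.contains_eq_isSome_get?, h]
          have hd : PySem.Dict.getD scs (String.singleton ch) 0 = v := by
            simp [PySem.Dict.getD_eq_get?_getD, h]
          dsimp only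
          rw [ih]
          simp [hc, hd]

theorem pv_subset_eq_all (scs : PySem.Dict String Int) (cs : List Char) :
    PySem.Set.issubset (PySem.Set.ofList (cs.map String.singleton)) (PySem.Dict.keys scs)
      = cs.all (fun ch => PySem.Dict.contains scs (String.singleton ch)) := by
  by_cases h : ∀ ch ∈ cs, PySem.Dict.contains scs (String.singleton ch) = true
  · have h1 : PySem.Set.issubset (PySem.Set.ofList (cs.map String.singleton)) (PySem.Dict.keys scs) = true := by
      rw [PySem.Set.issubset_iff]
      intro x hx
      rw [PySem.Set.mem_ofList, List.mem_map] at hx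
      obtain ⟨ch, hch, rfl⟩ := hx
      exact (PySem.Dict.contains_iff_mem_keys scs _).mp (h ch hch)
    rw [h1, Eq.comm, List.all_eq_true]
    exact h
  · have h1 : PySem.Set.issubset (PySem.Set.ofList (cs.map String.singleton)) (PySem.Dict.keys scs) = false := by
      rw [Bool.eq_false_iff]
      intro hc
      rw [PySem.Set.issubset_iff] at hc
      apply h
      intro ch hch
      rw [PySem.Dict.contains_iff_mem_keys]
      exact hc _ (by rw [PySem.Set.mem_ofList]; exact List.mem_map_of_mem hch)
    have h2 : cs.all (fun ch => PySem.Dict.contains scs (String.singleton ch)) = false := by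
      rw [Bool.eq_false_iff]
      intro hc
      exact h (List.all_eq_true.mp hc)
    rw [h1, h2]

-- ===== VERDICT (by name: the statement is the Claim_ definition above) =====
theorem build_character_tokenization_spec : Claim_equal_build_character_tokenization := by
  intro text scs _
  unfold Spec_build_character_tokenization build_character_tokenization build_character_tokenization_alt
  rw [pvA_loop_eq]
  simp only [pv_subset_eq_all]
  simp
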